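-- pv_equiv track=rewrite | github.com/Urveegupta/RISC-V-SIMULATOR-FINAL | PHASE-3-FINAL/RISC-V-Simulator-Phase3/src/pipelining.py | shiftRightLogical
-- ===== SOURCE A (Python) =====
-- def shiftRightLogical(n, m):  # shift n right by m bits
--     if (n >= 0):
--         return n >> m
--     s = ''
--     b = bin(-n)[2:].zfill(32)
--     ns = ''
--     for bit in b:
--         ns += str(1 ^ int(bit))
--     ns = bin(int(ns, 2)+1)[-32:]
--     shifted = '0'*m + ns[:32-m]
--     return int('0b'+shifted, 2)
-- ===== SOURCE B (Python) =====
-- def shiftRightLogical(n, m):  # shift n right by m bits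
--     return (n % 0x100000000) >> m
-- ===== Notes on version B (the rewrite author's own statement) =====
-- stated objective: simpler
-- what changed: Replaces the negative branch's per-bit string construction (bin, zfill, char-by-char inversion, +1, slicing) with the arithmetic identity n % 2**32, which yields the same 32-bit two's-complement value, followed by a single zero-filling right shift.
-- intended difference: For n < 0 and 32 < m < 64 A slices the 32-bit pattern by only m-32 bits (e.g. shiftRightLogical(-5,33) returns 2147483645), while B returns 0, the correct logical right shift of a 32-bit value by more than 31 bits. — e.g. on shiftRightLogical(-5, 33): A returns 2147483645, B returns 0
-- outside the precondition, e.g. on shiftRightLogical(5, -1): A raises ValueError, B raises ValueError; on shiftRightLogical(-5, -1): A returns 4294967291, B raises ValueError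
import Mathlib
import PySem

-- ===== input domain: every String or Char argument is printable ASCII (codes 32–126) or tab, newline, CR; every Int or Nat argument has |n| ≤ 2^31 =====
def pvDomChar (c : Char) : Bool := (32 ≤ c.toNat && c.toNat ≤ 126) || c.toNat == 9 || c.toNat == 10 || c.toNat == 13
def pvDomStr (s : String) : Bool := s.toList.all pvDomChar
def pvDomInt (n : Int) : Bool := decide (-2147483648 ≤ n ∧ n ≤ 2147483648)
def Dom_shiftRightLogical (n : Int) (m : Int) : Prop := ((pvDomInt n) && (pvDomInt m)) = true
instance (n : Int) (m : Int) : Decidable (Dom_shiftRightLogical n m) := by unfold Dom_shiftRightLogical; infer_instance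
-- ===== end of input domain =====

-- B replaces A's per-bit string construction of the 32-bit two's complement with 'n % 2**32' and one zero-filling shift.
-- ===== PORT A =====
-- bin(x)[2:] for x > 0, digits most significant first (fuel-indexed so the kernel can evaluate it; fuel ≥ value)
def pvBitsF : Nat → Nat → List Char
  | _, 0 => []
  | 0, _ + 1 => []
  | f + 1, v + 1 => pvBitsF f ((v + 1) / 2) ++ [if (v + 1) % 2 = 1 then '1' else '0']

def pvBits (v : Nat) : List Char := pvBitsF v v

-- bin(x)[2:] for x ≥ 0
def pvBin (x : Nat) : List Char := if x = 0 then ['0'] else pvBits x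

-- int(s, 2) for a string of '0'/'1' digits
def pvParseBin (l : List Char) : Nat := l.foldl (fun a c => 2 * a + (if c = '1' then 1 else 0)) 0

def shiftRightLogical (n : Int) (m : Int) : Int :=
  if n ≥ 0 then n >>> m.toNat
  else
    -- b = bin(-n)[2:].zfill(32)
    let b : List Char := List.replicate (32 - (pvBin (-n).toNat).length) '0' ++ pvBin (-n).toNat
    -- ns accumulated char by char: ns += str(1 ^ int(bit))
    let ns : List Char := b.foldl (fun acc c => acc ++ [if c = '1' then '0' else '1']) []
    -- ns = bin(int(ns,2)+1)[-32:]  ('0b' prefix included in the slice, as in Python)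
    let s : List Char := '0' :: 'b' :: pvBin (pvParseBin ns + 1)
    let ns2 : List Char := PySem.List.slice s (some (-32)) none
    -- shifted = '0'*m + ns[:32-m]
    let shifted : List Char := List.replicate m.toNat '0' ++ PySem.List.slice ns2 none (some (32 - m))
    -- int('0b'+shifted, 2)
    (pvParseBin shifted : Int)

-- ===== PORT B =====
def shiftRightLogical_alt (n : Int) (m : Int) : Int :=
  (PySem.Int.mod n 4294967296) >>> m.toNat

-- ===== PRECONDITION & SPEC =====
-- Pre_ excludes m < 0: there Python's '>>' raises ValueError for n ≥ 0 in A and always in B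
-- (A's n < 0 string path happens to return the unshifted two's-complement value, which B cannot return without raising).
def Pre_shiftRightLogical (n : Int) (m : Int) : Prop := 0 ≤ m
instance (n : Int) (m : Int) : Decidable (Pre_shiftRightLogical n m) := by unfold Pre_shiftRightLogical; infer_instance
def pvWitness_shiftRightLogical : Int × Int := (-5, 1)

-- For n < 0 and 32 < m < 64 A slices the 32-bit pattern by only m-32 bits (a slip in 'ns[:32-m]'),
-- returning e.g. 2147483645 for (-5, 33); B returns 0, the correct logical right shift of a 32-bit value by ≥ 32 bits.
def D_shiftRightLogical (n : Int) (m : Int) : Prop := n < 0 ∧ 32 < m ∧ m < 64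
instance (n : Int) (m : Int) : Decidable (D_shiftRightLogical n m) := by unfold D_shiftRightLogical; infer_instance

def Spec_shiftRightLogical (n : Int) (m : Int) (out : Int) : Prop := ¬ D_shiftRightLogical n m → out = shiftRightLogical_alt n m
instance (n : Int) (m : Int) (out : Int) : Decidable (Spec_shiftRightLogical n m out) := by unfold Spec_shiftRightLogical; infer_instance

def pvDiffWitness_shiftRightLogical : Int × Int := (-5, 33)
def pvDiffWitnessOut_shiftRightLogical : Int × Int := (2147483645, 0)

-- ===== CLAIM (what is proved, stated in full; the proofs are below) =====
def Claim_unchanged_shiftRightLogical : Prop := ∀ (n : Int) (m : Int), Dom_shiftRightLogical n m → Pre_shiftRightLogical n m → Spec_shiftRightLogical n m (shiftRightLogical n m)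
def Claim_changed_shiftRightLogical : Prop := Dom_shiftRightLogical (pvDiffWitness_shiftRightLogical.1) (pvDiffWitness_shiftRightLogical.2) ∧ Pre_shiftRightLogical (pvDiffWitness_shiftRightLogical.1) (pvDiffWitness_shiftRightLogical.2) ∧ D_shiftRightLogical (pvDiffWitness_shiftRightLogical.1) (pvDiffWitness_shiftRightLogical.2) ∧ shiftRightLogical (pvDiffWitness_shiftRightLogical.1) (pvDiffWitness_shiftRightLogical.2) = pvDiffWitnessOut_shiftRightLogical.1 ∧ shiftRightLogical_alt (pvDiffWitness_shiftRightLogical.1) (pvDiffWitness_shiftRightLogical.2) = pvDiffWitnessOut_shiftRightLogical.2 ∧ pvDiffWitnessOut_shiftRightLogical.1 ≠ pvDiffWitnessOut_shiftRightLogical.2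
def Claim_exact_shiftRightLogical : Prop := ∀ (n : Int) (m : Int), Dom_shiftRightLogical n m → Pre_shiftRightLogical n m → D_shiftRightLogical n m → shiftRightLogical n m ≠ shiftRightLogical_alt n m

-- ===== LEMMAS AND PROOFS =====

def pvIsBits (l : List Char) : Prop := ∀ c ∈ l, c = '0' ∨ c = '1'

theorem pvBitsF_congr : ∀ (v f g : Nat), v ≤ f → v ≤ g → pvBitsF f v = pvBitsF g v := by
  intro v
  induction v using Nat.strong_induction_on with
  | _ v ih =>
    intro f g hf hg
    match v, f, g with
    | 0, f, g => cases f <;> cases g <;> rfl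
    | v + 1, f + 1, g + 1 =>
      simp only [pvBitsF]
      congr 1
      exact ih ((v + 1) / 2) (by omega) f g (by omega) (by omega)

theorem pvBits_pos (v : Nat) (h : 0 < v) :
    pvBits v = pvBits (v / 2) ++ [if v % 2 = 1 then '1' else '0'] := by
  match v, h with
  | v + 1, _ =>
    show pvBitsF (v + 1) (v + 1) = _
    simp only [pvBitsF]
    congr 1
    exact pvBitsF_congr ((v + 1) / 2) v ((v + 1) / 2) (by omega) le_rfl

theorem pvBits_zero : pvBits 0 = [] := rfl

theorem pvParse_go (l : List Char) : ∀ a : Nat,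
    List.foldl (fun a c => 2 * a + (if c = '1' then 1 else 0)) a l
      = a * 2 ^ l.length + pvParseBin l := by
  induction l with
  | nil => intro a; simp [pvParseBin]
  | cons c l ih =>
    intro a
    simp only [List.foldl_cons, List.length_cons]
    rw [ih]
    have h2 : pvParseBin (c :: l) = (if c = '1' then 1 else 0) * 2 ^ l.length + pvParseBin l := by
      show List.foldl _ _ (c :: l) = _
      rw [List.foldl_cons, ih]
      simp [pvParseBin]
    rw [h2]
    ring

theorem pvParse_append (l₁ l₂ : List Char) :
    pvParseBin (l₁ ++ l₂) = pvParseBin l₁ * 2 ^ l₂.length + pvParseBin l₂ := by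
  simp only [pvParseBin, List.foldl_append]
  rw [pvParse_go]
  rfl

theorem pvParse_cons (c : Char) (l : List Char) :
    pvParseBin (c :: l) = (if c = '1' then 1 else 0) * 2 ^ l.length + pvParseBin l := by
  have := pvParse_append [c] l
  simpa [pvParseBin] using this

theorem pvParse_lt (l : List Char) (h : pvIsBits l) : pvParseBin l < 2 ^ l.length := by
  induction l with
  | nil => simp [pvParseBin]
  | cons c l ih =>
    rw [pvParse_cons]
    have hb := ih (fun x hx => h x (List.mem_cons_of_mem _ hx))
    have : (if c = '1' then 1 else 0) ≤ 1 := by split <;> omega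
    simp only [List.length_cons, pow_succ]
    nlinarith [pow_pos (show 0 < 2 by norm_num) l.length]

theorem pvParse_pvBits (v : Nat) : pvParseBin (pvBits v) = v := by
  induction v using Nat.strong_induction_on with
  | _ v ih =>
    rcases Nat.eq_zero_or_pos v with h | h
    · subst h; simp [pvBits_zero, pvParseBin]
    · rw [pvBits_pos v h, pvParse_append, ih (v / 2) (by omega)]
      have : pvParseBin [if v % 2 = 1 then '1' else '0'] = v % 2 := by
        rcases Nat.mod_two_eq_zero_or_one v with h2 | h2 <;> simp [h2, pvParseBin]
      rw [this]
      simp only [List.length_singleton, pow_one]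
      omega

theorem pvBits_len_le_iff (k : Nat) : ∀ v : Nat, (pvBits v).length ≤ k ↔ v < 2 ^ k := by
  induction k with
  | zero =>
    intro v
    rcases Nat.eq_zero_or_pos v with h | h
    · subst h; simp [pvBits_zero]
    · rw [pvBits_pos v h]
      simp only [List.length_append, List.length_singleton]
      omega
  | succ k ih =>
    intro v
    rcases Nat.eq_zero_or_pos v with h | h
    · subst h
      simp [pvBits_zero]
    · rw [pvBits_pos v h]
      simp only [List.length_append, List.length_singleton]
      rw [show (pvBits (v / 2)).length + 1 ≤ k + 1 ↔ (pvBits (v / 2)).length ≤ k by omega,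
        ih (v / 2), pow_succ]
      omega

theorem pvIsBits_pvBits (v : Nat) : pvIsBits (pvBits v) := by
  induction v using Nat.strong_induction_on with
  | _ v ih =>
    rcases Nat.eq_zero_or_pos v with h | h
    · subst h; intro c hc; simp [pvBits_zero] at hc
    · rw [pvBits_pos v h]
      intro c hc
      rcases List.mem_append.mp hc with hc | hc
      · exact ih (v / 2) (by omega) c hc
      · simp only [List.mem_singleton] at hc
        subst hc
        split <;> simp

theorem pvParse_replicate_zero (k : Nat) : pvParseBin (List.replicate k '0') = 0 := by
  induction k with
  | zero => rfl
  | succ k ih =>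
    rw [List.replicate_succ, pvParse_cons, ih]
    simp

theorem pvLoop_eq_map (l : List Char) : ∀ acc : List Char,
    List.foldl (fun acc c => acc ++ [if c = '1' then '0' else '1']) acc l
      = acc ++ l.map (fun c => if c = '1' then '0' else '1') := by
  induction l with
  | nil => intro acc; simp
  | cons c l ih =>
    intro acc
    simp only [List.foldl_cons, List.map_cons]
    rw [ih]
    simp

theorem pvParse_map_flip (l : List Char) (h : pvIsBits l) :
    (pvParseBin (l.map (fun c => if c = '1' then '0' else '1')) : Int)
      = 2 ^ l.length - 1 - pvParseBin l := by
  induction l with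
  | nil => simp [pvParseBin]
  | cons c l ih =>
    have hc := h c (List.mem_cons_self ..)
    have hb := ih (fun x hx => h x (List.mem_cons_of_mem _ hx))
    have hlt := pvParse_lt l (fun x hx => h x (List.mem_cons_of_mem _ hx))
    simp only [List.map_cons]
    rw [pvParse_cons, pvParse_cons]
    simp only [List.length_map, List.length_cons]
    push_cast
    rw [hb]
    rcases hc with hc | hc <;> subst hc <;> simp <;> ring

theorem pvParse_take (l : List Char) (h : pvIsBits l) (k : Nat) (_hk : k ≤ l.length) :
    pvParseBin (List.take k l) = pvParseBin l / 2 ^ (l.length - k) := by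
  have hsplit := pvParse_append (List.take k l) (List.drop k l)
  rw [List.take_append_drop] at hsplit
  have hdlen : (List.drop k l).length = l.length - k := by simp
  have hdlt : pvParseBin (List.drop k l) < 2 ^ (l.length - k) := by
    rw [← hdlen]
    exact pvParse_lt _ (fun x hx => h x (List.mem_of_mem_drop hx))
  have hp : 0 < 2 ^ (l.length - k) := by positivity
  rw [hsplit, hdlen, Nat.add_comm, Nat.add_mul_div_right _ _ hp, Nat.div_eq_of_lt hdlt]
  omega

-- the negative branch reduces to the 32-bit two's-complement pattern pvBits (2^32 + n)
theorem pvBits_u_facts (n : Int) (hn : n < 0) (hd : -2147483648 ≤ n) :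
    (pvBits (2 ^ 32 + n).toNat).length = 32 ∧ pvIsBits (pvBits (2 ^ 32 + n).toNat)
      ∧ pvParseBin (pvBits (2 ^ 32 + n).toNat) = (2 ^ 32 + n).toNat := by
  set U := (2 ^ 32 + n).toNat with hU
  have hU1 : 2 ^ 31 ≤ U := by omega
  have hU2 : U < 2 ^ 32 := by omega
  have hle : (pvBits U).length ≤ 32 := (pvBits_len_le_iff 32 U).mpr hU2
  have hgt : ¬ (pvBits U).length ≤ 31 := by
    rw [pvBits_len_le_iff 31 U]
    omega
  refine ⟨by omega, pvIsBits_pvBits U, pvParse_pvBits U⟩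

theorem pvBin_pos (x : Nat) (h : x ≠ 0) : pvBin x = pvBits x := by
  unfold pvBin; rw [if_neg h]

theorem pvA_neg (n m : Int) (hn : n < 0) (hd : -2147483648 ≤ n) :
    shiftRightLogical n m
      = (pvParseBin (List.replicate m.toNat '0'
          ++ PySem.List.slice (pvBits (2 ^ 32 + n).toNat) none (some (32 - m))) : Int) := by
  have hne : ¬ n ≥ 0 := by omega
  have ht0 : (-n).toNat ≠ 0 := by omega
  simp only [shiftRightLogical, if_neg hne]
  rw [pvBin_pos _ ht0]
  set t := (-n).toNat with htdef
  have ht1 : 1 ≤ t := by omega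
  have ht2 : t ≤ 2 ^ 31 := by omega
  have hlenL : (pvBits t).length ≤ 32 := (pvBits_len_le_iff 32 t).mpr (by omega)
  set b : List Char := List.replicate (32 - (pvBits t).length) '0' ++ pvBits t with hb
  have hblen : b.length = 32 := by
    simp only [hb, List.length_append, List.length_replicate]
    omega
  have hbbits : pvIsBits b := by
    intro c hc
    rcases List.mem_append.mp hc with hc | hc
    · left; exact (List.eq_of_mem_replicate hc)
    · exact pvIsBits_pvBits t c hc
  have hbparse : pvParseBin b = t := by
    rw [hb, pvParse_append, pvParse_replicate_zero, pvParse_pvBits]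
    omega
  rw [pvLoop_eq_map, List.nil_append]
  have hflip : pvParseBin (b.map (fun c => if c = '1' then '0' else '1')) + 1
      = (2 ^ 32 + n).toNat := by
    have h1 := pvParse_map_flip b hbbits
    rw [hbparse, hblen] at h1
    omega
  rw [hflip]
  rw [pvBin_pos _ (by omega)]
  obtain ⟨hulen, _, _⟩ := pvBits_u_facts n hn hd
  rw [PySem.List.slice_from_neg_ofNat _ 32 (by norm_num)]
  have hslen : ('0' :: 'b' :: pvBits (2 ^ 32 + n).toNat).length - 32 = 2 := by
    simp only [List.length_cons, hulen]
  rw [hslen]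
  rfl


theorem pvB_eq (n m : Int) (hn : n < 0) (hd : -2147483648 ≤ n) (_hm : 0 ≤ m) :
    shiftRightLogical_alt n m = ((2 ^ 32 + n).toNat / 2 ^ m.toNat : Nat) := by
  unfold shiftRightLogical_alt
  rw [PySem.Int.mod_eq_emod_of_pos (by norm_num)]
  have h1 : n % 4294967296 = ((2 ^ 32 + n).toNat : Int) := by omega
  rw [h1, Int.shiftRight_eq_div_pow]
  exact (Int.natCast_div _ _).symm

-- ===== VERDICT (by name: the statement is the Claim_ definition above) =====
theorem shiftRightLogical_spec : Claim_unchanged_shiftRightLogical := by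
  intro n m hdom hpre hnd
  have hb : -2147483648 ≤ n ∧ n ≤ 2147483648 ∧ -2147483648 ≤ m ∧ m ≤ 2147483648 := by
    simp only [Dom_shiftRightLogical, pvDomInt, Bool.and_eq_true, decide_eq_true_eq] at hdom
    exact ⟨hdom.1.1, hdom.1.2, hdom.2.1, hdom.2.2⟩
  have hm : 0 ≤ m := hpre
  by_cases hn : n ≥ 0
  · simp only [shiftRightLogical, if_pos hn, shiftRightLogical_alt]
    rw [PySem.Int.mod_eq_emod_of_pos (by norm_num)]
    rw [show n % 4294967296 = n by omega]
  · have hn' : n < 0 := by omega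
    have hD : ¬ (32 < m ∧ m < 64) := by
      simp only [D_shiftRightLogical] at hnd
      tauto
    rw [pvA_neg n m hn' hb.1, pvB_eq n m hn' hb.1 hm]
    obtain ⟨hulen, hubits, huparse⟩ := pvBits_u_facts n hn' hb.1
    by_cases hm32 : m ≤ 32
    · rw [PySem.List.slice_to _ (by omega : (0:Int) ≤ 32 - m)]
      rw [pvParse_append, pvParse_replicate_zero]
      have hk : (32 - m).toNat = 32 - m.toNat := by omega
      rw [hk, pvParse_take _ hubits (32 - m.toNat) (by omega)]
      rw [huparse, hulen]
      have : 32 - (32 - m.toNat) = m.toNat := by omega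
      rw [this]
      norm_num
    · have hm64 : 64 ≤ m := by omega
      have hk : (32 : Int) - m = -(((m - 32).toNat : Nat) : Int) := by omega
      rw [hk, PySem.List.slice_to_neg_natCast _ _ (by omega)]
      rw [hulen, show 32 - (m - 32).toNat = 0 by omega, List.take_zero, List.append_nil,
        pvParse_replicate_zero]
      have hz : (2 ^ 32 + n).toNat / 2 ^ m.toNat = 0 := by
        apply Nat.div_eq_of_lt
        calc (2 ^ 32 + n).toNat < 2 ^ 32 := by omega
          _ ≤ 2 ^ m.toNat := Nat.pow_le_pow_right (by norm_num) (by omega)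
      rw [hz]
theorem shiftRightLogical_changed : Claim_changed_shiftRightLogical := by unfold Claim_changed_shiftRightLogical; decide
theorem shiftRightLogical_tight : Claim_exact_shiftRightLogical := by
  intro n m hdom hpre hD
  obtain ⟨hn, hm1, hm2⟩ := hD
  have hb : -2147483648 ≤ n ∧ n ≤ 2147483648 := by
    simp only [Dom_shiftRightLogical, pvDomInt, Bool.and_eq_true, decide_eq_true_eq] at hdom
    exact ⟨hdom.1.1, hdom.1.2⟩
  rw [pvA_neg n m hn hb.1, pvB_eq n m hn hb.1 hpre]
  obtain ⟨hulen, hubits, huparse⟩ := pvBits_u_facts n hn hb.1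
  have hk : (32 : Int) - m = -(((m - 32).toNat : Nat) : Int) := by omega
  rw [hk, PySem.List.slice_to_neg_natCast _ _ (by omega)]
  rw [hulen, pvParse_append, pvParse_replicate_zero]
  have hkle : 32 - (m - 32).toNat ≤ 32 := by omega
  rw [pvParse_take _ hubits _ (by omega), huparse, hulen]
  have h32 : 32 - (32 - (m - 32).toNat) = (m - 32).toNat := by omega
  rw [h32]
  have hA : 1 ≤ (2 ^ 32 + n).toNat / 2 ^ (m - 32).toNat := by
    rw [Nat.le_div_iff_mul_le (by positivity), one_mul]
    have h1 : (2 : Nat) ^ (m - 32).toNat ≤ 2 ^ 31 := Nat.pow_le_pow_right (by norm_num) (by omega)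
    have h2 : (2 : Nat) ^ 31 ≤ (2 ^ 32 + n).toNat := by omega
    exact le_trans h1 h2
  have hB : (2 ^ 32 + n).toNat / 2 ^ m.toNat = 0 := by
    apply Nat.div_eq_of_lt
    calc (2 ^ 32 + n).toNat < 2 ^ 32 := by omega
      _ ≤ 2 ^ m.toNat := Nat.pow_le_pow_right (by norm_num) (by omega)
  rw [hB]
  simp only [Nat.cast_zero, ne_eq, Nat.cast_eq_zero]
  omega
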